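-- pv_equiv track=rewrite | github.com/zz9tf/mal-rag-hotpot | preprocessing_wikipedia_dataset.py | _remove_braces_content
-- ===== SOURCE A (Python) =====
-- def _remove_braces_content(text):
--     """
--     Removes { }
--     """
--     stack = []
--     result = []
--     i = 0
--
--     while i < len(text):
--         char = text[i]
--         if char == '{' and i + 1 < len(text) and text[i + 1] == '{':
--             # Push the current length of result onto the stack to remember where the brace started
--             stack.append(len(result))
--             i += 1  # Skip the second '{'
--         elif char == '}' and i + 1 < len(text) and text[i + 1] == '}' and len(stack) > 0:
--             start = stack.pop()
--             block_content = ''.join(result[start:])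
--             if '|' in block_content and len(block_content.split('|')) == 2 and block_content[0] == 'Blockquote':
--                 # Keep only the content is only two part splitted by '|'
--                 keep_content = block_content.split('|')[1]
--                 result = result[:start] + list(keep_content)
--             else:
--                 result = result[:start]
--             i += 1  # Skip the second '}'
--         else:
--             # Append character to the result only if not within braces
--             result.append(char)
--         i += 1
--
--     # Join the result back into a string
--     return ''.join(result)
-- ===== SOURCE B (Python) =====
-- def _remove_braces_content(text):
--     """
--     Removes {{ ... }} content in one pass: a stack of buffers instead of
--     repeated list slicing/joining.
--     """
--     cur = []
--     stack = []
--     i, n = 0, len(text)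
--     while i < n:
--         c = text[i]
--         if c == '{' and i + 1 < n and text[i + 1] == '{':
--             stack.append(cur)
--             cur = []
--             i += 2
--         elif c == '}' and i + 1 < n and text[i + 1] == '}' and stack:
--             cur = stack.pop()  # discard the matched block's content
--             i += 2
--         else:
--             cur.append(c)
--             i += 1
--     stack.append(cur)
--     return ''.join(''.join(b) for b in stack)
-- ===== Notes on version B (the rewrite author's own statement) =====
-- stated objective: alternative
-- what changed: Replaced the position-stack with repeated list slicing/joining on every closed brace pair by a single pass that keeps a stack of buffers and simply discards the top buffer when a pair closes (the Blockquote branch in A is dead code: a one-character string never equals 'Blockquote').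
import Mathlib
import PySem

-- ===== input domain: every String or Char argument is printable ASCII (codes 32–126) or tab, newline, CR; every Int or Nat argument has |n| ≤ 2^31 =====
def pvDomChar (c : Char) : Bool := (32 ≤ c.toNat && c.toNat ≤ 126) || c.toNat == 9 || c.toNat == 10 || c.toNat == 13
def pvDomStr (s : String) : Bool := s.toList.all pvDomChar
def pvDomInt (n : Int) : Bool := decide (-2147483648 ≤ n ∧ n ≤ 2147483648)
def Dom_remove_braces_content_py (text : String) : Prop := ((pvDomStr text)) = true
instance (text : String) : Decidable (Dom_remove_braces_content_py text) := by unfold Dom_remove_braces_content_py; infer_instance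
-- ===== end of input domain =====

-- B replaces A's position-stack + list slicing/joining on each closed '}}' by a single
-- pass over the characters with a stack of buffers (objective: alternative algorithm;
-- intended as faster on brace-heavy text, but not measurably faster in a timing run).

-- ===== PORT A =====
-- A's while loop over index i, transcribed as recursion on the remaining characters
-- (text[i] = head, text[i+1] = next head); state: stack of recorded result-lengths
-- (Python list.append/pop at the end = cons/uncons at the head) and the result chars.
def pvLoopA : List Char → List Nat → List Char → List Char
  | [], _, result => result
  | '{' :: '{' :: cs, stack, result =>
      -- push len(result), skip both '{'
      pvLoopA cs (result.length :: stack) result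
  | '}' :: '}' :: cs, start :: stack', result =>
      let bc := result.drop start      -- block_content = ''.join(result[start:])
      -- Python compares the ONE-CHARACTER string block_content[0] with 'Blockquote';
      -- ported exactly: the char wrapped as a singleton string (list of chars).
      if (PySem.Chars.isIn ['|'] bc) = true ∧ (PySem.Chars.splitOn bc ['|']).length = 2 ∧
         (PySem.Chars.pyGet? bc 0).map (fun ch => [ch]) = some ("Blockquote".toList) then
        -- keep_content = block_content.split('|')[1]  (index 1 in range: split length is 2)
        pvLoopA cs stack' (result.take start ++ PySem.List.pyGetD (PySem.Chars.splitOn bc ['|']) 1 [])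
      else
        pvLoopA cs stack' (result.take start)
  | c :: cs, stack, result => pvLoopA cs stack (result ++ [c])

def remove_braces_content_py (text : String) : String :=
  String.mk (pvLoopA text.toList [] [])

-- ===== PORT B =====
-- B's single pass: cur is the current buffer, stack the saved outer buffers
-- (Python list.append/pop at the end = cons/uncons at the head); at the end the
-- saved buffers and cur are joined in order (stack.append(cur); join).
def pvLoopB : List Char → List Char → List (List Char) → String
  | [], cur, stack => String.mk ((cur :: stack).reverse.flatten)
  | '{' :: '{' :: cs, cur, stack => pvLoopB cs [] (cur :: stack)
  | '}' :: '}' :: cs, _cur, b :: stack' => pvLoopB cs b stack'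
  | '}' :: '}' :: cs, cur, [] => pvLoopB ('}' :: cs) (cur ++ ['}']) []
  | c :: cs, cur, stack => pvLoopB cs (cur ++ [c]) stack

def remove_braces_content_py_alt (text : String) : String :=
  pvLoopB text.toList [] []

-- ===== PRECONDITION & SPEC =====
def Spec_remove_braces_content_py (text : String) (out : String) : Prop := out = remove_braces_content_py_alt text
instance (text : String) (out : String) : Decidable (Spec_remove_braces_content_py text out) := by unfold Spec_remove_braces_content_py; infer_instance

-- ===== CLAIM (what is proved, stated in full; the proofs are below) =====
def Claim_equal_remove_braces_content_py : Prop := ∀ (text : String), Dom_remove_braces_content_py text → Spec_remove_braces_content_py text (remove_braces_content_py text)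

-- ===== LEMMAS AND PROOFS =====

-- flatten of B's saved buffers, oldest first
def pvFlat (stack : List (List Char)) : List Char := stack.reverse.flatten

-- the position marks A's stack holds when B's state is (cur, stack)
def pvMarks : List (List Char) → List Nat
  | [] => []
  | b :: rest => (pvFlat (b :: rest)).length :: pvMarks rest

lemma pvFlat_cons (b : List Char) (s : List (List Char)) :
    pvFlat (b :: s) = pvFlat s ++ b := by
  simp [pvFlat]

-- A's Blockquote branch is dead: a one-character string never equals "Blockquote".
lemma pvBlockquoteDead (bc : List Char) :
    ¬((PySem.Chars.isIn ['|'] bc) = true ∧ (PySem.Chars.splitOn bc ['|']).length = 2 ∧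
      (PySem.Chars.pyGet? bc 0).map (fun ch => [ch]) = some ("Blockquote".toList)) := by
  rintro ⟨-, -, h⟩
  cases hg : PySem.Chars.pyGet? bc 0 with
  | none => rw [hg] at h; simp at h
  | some ch => rw [hg] at h; simp at h

lemma pvLoopA_default (c : Char) (cs : List Char) (st : List Nat) (r : List Char)
    (h1 : ∀ cs1, c = '{' → cs = '{' :: cs1 → False)
    (h2 : ∀ cs1 (s : Nat) (st' : List Nat), st = s :: st' → c = '}' → cs = '}' :: cs1 → False) :
    pvLoopA (c :: cs) st r = pvLoopA cs st (r ++ [c]) := by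
  rw [pvLoopA.eq_def]
  split <;> simp_all

lemma pvLoopB_default (c : Char) (cs cur : List Char) (stack : List (List Char))
    (h1 : ∀ cs1, c = '{' → cs = '{' :: cs1 → False)
    (h2 : ∀ cs1 (b : List Char) (stack' : List (List Char)), stack = b :: stack' → c = '}' → cs = '}' :: cs1 → False)
    (h3 : ∀ cs1, stack = [] → c = '}' → cs = '}' :: cs1 → False) :
    pvLoopB (c :: cs) cur stack = pvLoopB cs (cur ++ [c]) stack := by
  rw [pvLoopB.eq_def]
  split <;> simp_all

lemma pvKey : ∀ (cs cur : List Char) (stack : List (List Char)),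
    String.mk (pvLoopA cs (pvMarks stack) (pvFlat stack ++ cur)) = pvLoopB cs cur stack := by
  intro cs cur stack
  induction cs, cur, stack using pvLoopB.induct with
  | case1 cur stack =>
      simp [pvLoopA, pvLoopB, pvFlat]
  | case2 cs cur stack ih =>
      have hA : pvLoopA ('{' :: '{' :: cs) (pvMarks stack) (pvFlat stack ++ cur)
          = pvLoopA cs ((pvFlat stack ++ cur).length :: pvMarks stack) (pvFlat stack ++ cur) := rfl
      have hM : pvMarks (cur :: stack) = (pvFlat (cur :: stack)).length :: pvMarks stack := rfl
      rw [hA, pvLoopB, ← ih, hM, pvFlat_cons]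
      simp
  | case3 cs cur b stack' ih =>
      have hM : pvMarks (b :: stack') = (pvFlat (b :: stack')).length :: pvMarks stack' := rfl
      rw [hM]
      have hA : pvLoopA ('}' :: '}' :: cs) ((pvFlat (b :: stack')).length :: pvMarks stack')
            (pvFlat (b :: stack') ++ cur)
          = pvLoopA cs (pvMarks stack')
              ((pvFlat (b :: stack') ++ cur).take (pvFlat (b :: stack')).length) := by
        rw [pvLoopA]
        rw [if_neg (pvBlockquoteDead _)]
      rw [hA, pvLoopB, ← ih]
      congr 2
      rw [pvFlat_cons]
      simp [List.take_append]
  | case4 cs cur ih =>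
      have hA : pvLoopA ('}' :: '}' :: cs) (pvMarks ([] : List (List Char))) (pvFlat [] ++ cur)
          = pvLoopA ('}' :: cs) [] ((pvFlat [] ++ cur) ++ ['}']) := rfl
      rw [hA, pvLoopB, ← ih]
      simp [pvFlat, pvMarks]
  | case5 c cs cur stack h1 h2 h3 ih =>
      have h2' : ∀ cs1 (s : Nat) (st' : List Nat), pvMarks stack = s :: st' → c = '}' → cs = '}' :: cs1 → False := by
        intro cs1 s st' hm hc hcs
        cases stack with
        | nil => simp [pvMarks] at hm
        | cons b rest => exact h2 cs1 b rest rfl hc hcs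
      rw [pvLoopA_default c cs _ _ h1 h2', pvLoopB_default c cs cur stack h1 h2 h3, ← ih]
      simp

-- ===== VERDICT (by name: the statement is the Claim_ definition above) =====
theorem remove_braces_content_py_spec : Claim_equal_remove_braces_content_py := by
  intro text _
  unfold Spec_remove_braces_content_py remove_braces_content_py remove_braces_content_py_alt
  have := pvKey text.toList [] []
  simpa [pvFlat] using this
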